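-- pv_equiv track=rewrite | github.com/frederikho/tiny-rts-tools | generate_map/generate_map.py | smooth_land
-- ===== SOURCE A (Python) =====
-- def smooth_land(mask: list[int], width: int, height: int, passes: int) -> list[int]:
--     current = mask[:]
--     for _ in range(passes):
--         updated = current[:]
--         for r in range(1, height - 1):
--             for c in range(1, width - 1):
--                 idx = r * width + c
--                 neighbors = 0
--                 for dr in (-1, 0, 1):
--                     for dc in (-1, 0, 1):
--                         if dr == 0 and dc == 0:
--                             continue
--                         neighbors += current[(r + dr) * width + (c + dc)]
--                 if current[idx]:
--                     updated[idx] = 1 if neighbors >= 3 else 0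
--                 else:
--                     updated[idx] = 1 if neighbors >= 5 else 0
--         current = updated
--     return current
-- ===== SOURCE B (Python) =====
-- def smooth_land(mask: list[int], width: int, height: int, passes: int) -> list[int]:
--     current = list(mask)
--     if width < 3 or height < 3:
--         return current
--     n = len(current)
--     lo, hi = width, width * (height - 1)
--     for _ in range(passes):
--         # separable convolution: vertical 3-sums first, then horizontal 3-sums
--         V = [current[i - width] + current[i] + current[i + width]
--              if lo <= i < hi else 0
--              for i in range(n)]
--         current = [_smooth_cell(current, V, width, height, i) for i in range(n)]
--     return current
--
--
-- def _smooth_cell(cur, V, width, height, i):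
--     r, c = divmod(i, width)
--     if 1 <= r <= height - 2 and 1 <= c <= width - 2:
--         nb = V[i - 1] + V[i] + V[i + 1] - cur[i]
--         if cur[i]:
--             return 1 if nb >= 3 else 0
--         return 1 if nb >= 5 else 0
--     return cur[i]
-- ===== Notes on version B (the rewrite author's own statement) =====
-- stated objective: alternative
-- what changed: Replaces the per-cell 3x3 neighbor scan (the dr/dc loops) by a separable convolution: one pass precomputes vertical 3-sums V, then each interior cell's 8-neighbor count is V[i-1]+V[i]+V[i+1]-cur[i]; the new grid is built functionally by index comprehensions instead of in-place assignment. Pre_ excludes only inputs on which A raises IndexError (len(mask) < width*height with width,height>=3 and passes>=1).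
import Mathlib
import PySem

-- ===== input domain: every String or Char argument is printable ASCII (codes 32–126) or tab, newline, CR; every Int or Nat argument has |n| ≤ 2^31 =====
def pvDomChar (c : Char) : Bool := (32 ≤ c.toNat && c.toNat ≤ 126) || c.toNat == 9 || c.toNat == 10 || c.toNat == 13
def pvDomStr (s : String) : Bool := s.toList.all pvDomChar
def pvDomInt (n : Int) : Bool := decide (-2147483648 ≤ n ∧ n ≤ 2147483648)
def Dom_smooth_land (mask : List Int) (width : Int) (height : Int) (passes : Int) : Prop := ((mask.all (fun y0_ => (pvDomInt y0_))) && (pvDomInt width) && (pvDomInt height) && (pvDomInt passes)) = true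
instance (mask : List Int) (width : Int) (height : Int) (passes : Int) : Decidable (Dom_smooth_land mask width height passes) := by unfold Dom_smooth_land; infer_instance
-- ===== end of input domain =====

-- B replaces A's per-cell 3x3 neighbor scan by a separable convolution (vertical 3-sums, then
-- horizontal), building each pass's grid by index comprehensions instead of in-place writes.


-- ===== PORT A =====
-- the dr/dc double loop accumulating the 8 neighbors
def pvNeigh (cur : List Int) (width r c : Int) : Int :=
  [(-1 : Int), 0, 1].foldl (fun acc dr =>
    [(-1 : Int), 0, 1].foldl (fun acc2 dc =>
      if dr = 0 ∧ dc = 0 then acc2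
      else acc2 + PySem.List.pyGetD cur ((r + dr) * width + (c + dc)) 0) acc) 0

-- one smoothing pass of A: the r/c loops writing into updated (= current[:])
def pvStepA (cur : List Int) (width height : Int) : List Int :=
  (PySem.List.pyRange 1 (height - 1) 1).foldl (fun upd r =>
    (PySem.List.pyRange 1 (width - 1) 1).foldl (fun upd c =>
      let idx := r * width + c
      let nb := pvNeigh cur width r c
      PySem.List.pySetD upd idx
        (if PySem.List.pyGetD cur idx 0 ≠ 0 then (if 3 ≤ nb then 1 else 0)
         else (if 5 ≤ nb then 1 else 0))) upd) cur

def smooth_land (mask : List Int) (width : Int) (height : Int) (passes : Int) : List Int :=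
  (List.range passes.toNat).foldl (fun cur _ => pvStepA cur width height) mask

-- ===== PORT B =====
-- vertical 3-sums: V[i] = cur[i-width] + cur[i] + cur[i+width] on full interior rows, else 0
def pvVert (cur : List Int) (width height : Int) : List Int :=
  (List.range cur.length).map (fun (i : Nat) =>
    if width ≤ (i : Int) ∧ (i : Int) < width * (height - 1) then
      PySem.List.pyGetD cur ((i : Int) - width) 0 + PySem.List.pyGetD cur (i : Int) 0
        + PySem.List.pyGetD cur ((i : Int) + width) 0
    else 0)

-- _smooth_cell from Source B
def pvSmoothCell (cur V : List Int) (width height : Int) (i : Nat) : Int :=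
  let r := PySem.Int.floordiv (i : Int) width
  let c := PySem.Int.mod (i : Int) width
  if 1 ≤ r ∧ r ≤ height - 2 ∧ 1 ≤ c ∧ c ≤ width - 2 then
    let nb := PySem.List.pyGetD V ((i : Int) - 1) 0 + PySem.List.pyGetD V (i : Int) 0
      + PySem.List.pyGetD V ((i : Int) + 1) 0 - PySem.List.pyGetD cur (i : Int) 0
    if PySem.List.pyGetD cur (i : Int) 0 ≠ 0 then (if 3 ≤ nb then 1 else 0)
    else (if 5 ≤ nb then 1 else 0)
  else PySem.List.pyGetD cur (i : Int) 0

def pvStepB (cur : List Int) (width height : Int) : List Int :=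
  let V := pvVert cur width height
  (List.range cur.length).map (pvSmoothCell cur V width height)

def smooth_land_alt (mask : List Int) (width : Int) (height : Int) (passes : Int) : List Int :=
  if width < 3 ∨ height < 3 then mask
  else (List.range passes.toNat).foldl (fun cur _ => pvStepB cur width height) mask

-- ===== PRECONDITION & SPEC =====
-- Pre_ excludes exactly the inputs on which A raises IndexError: a mask shorter than width*height
-- while the interior loops actually run (width ≥ 3, height ≥ 3, passes ≥ 1).
def Pre_smooth_land (mask : List Int) (width : Int) (height : Int) (passes : Int) : Prop :=
  (1 ≤ passes ∧ 3 ≤ width ∧ 3 ≤ height) → width * height ≤ (mask.length : Int)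
instance (mask : List Int) (width : Int) (height : Int) (passes : Int) : Decidable (Pre_smooth_land mask width height passes) := by unfold Pre_smooth_land; infer_instance

def pvWitness_smooth_land : List Int × Int × Int × Int := ([1, 1, 1, 1, 0, 1, 1, 1, 1], 3, 3, 1)

def Spec_smooth_land (mask : List Int) (width : Int) (height : Int) (passes : Int) (out : List Int) : Prop := out = smooth_land_alt mask width height passes
instance (mask : List Int) (width : Int) (height : Int) (passes : Int) (out : List Int) : Decidable (Spec_smooth_land mask width height passes out) := by unfold Spec_smooth_land; infer_instance

-- ===== CLAIM (what is proved, stated in full; the proofs are below) =====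
def Claim_equal_smooth_land : Prop := ∀ (mask : List Int) (width : Int) (height : Int) (passes : Int), Dom_smooth_land mask width height passes → Pre_smooth_land mask width height passes → Spec_smooth_land mask width height passes (smooth_land mask width height passes)

-- ===== LEMMAS AND PROOFS =====
-- proof-side abbreviations for A's nested write loop
def pvQ (w h : Int) : List (Int × Int) :=
  (PySem.List.pyRange 1 (h - 1) 1).flatMap (fun r =>
    (PySem.List.pyRange 1 (w - 1) 1).map (fun c => (r, c)))

def pvG (cur : List Int) (w : Int) (p : Int × Int) : Int :=
  if PySem.List.pyGetD cur (p.1 * w + p.2) 0 ≠ 0 then (if 3 ≤ pvNeigh cur w p.1 p.2 then 1 else 0)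
  else (if 5 ≤ pvNeigh cur w p.1 p.2 then 1 else 0)

theorem foldl_flatMap_pairs {α β γ : Type} (rows : List α) (cols : List β)
    (step : γ → α × β → γ) (u : γ) :
    rows.foldl (fun u r => cols.foldl (fun u c => step u (r, c)) u) u
      = (rows.flatMap (fun r => cols.map (fun c => (r, c)))).foldl step u := by
  induction rows generalizing u with
  | nil => rfl
  | cons r rows ih => simp [List.foldl_append, List.foldl_map, ih]

theorem stepA_eq_fold (cur : List Int) (w h : Int) :
    pvStepA cur w h
      = (pvQ w h).foldl (fun u p => PySem.List.pySetD u (p.1 * w + p.2) (pvG cur w p)) cur := by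
  unfold pvStepA pvQ
  exact foldl_flatMap_pairs _ _ (fun u p => PySem.List.pySetD u (p.1 * w + p.2) (pvG cur w p)) cur

theorem foldl_pySetD_length (Q : List (Int × Int)) (f g : Int × Int → Int) (u : List Int) :
    (Q.foldl (fun u p => PySem.List.pySetD u (f p) (g p)) u).length = u.length := by
  induction Q generalizing u with
  | nil => rfl
  | cons p Q ih => simp [ih, PySem.List.length_pySetD]

theorem foldl_pySetD_stable (Q : List (Int × Int)) (f g : Int × Int → Int) (u : List Int)
    (j : Nat) (v : Int)
    (hpos : ∀ p ∈ Q, 0 ≤ f p)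
    (hv : u[j]? = some v)
    (hsame : ∀ p ∈ Q, (f p).toNat = j → g p = v) :
    (Q.foldl (fun u p => PySem.List.pySetD u (f p) (g p)) u)[j]? = some v := by
  induction Q generalizing u with
  | nil => exact hv
  | cons p Q ih =>
    have hjlen : j < u.length := by
      rcases List.getElem?_eq_some_iff.mp hv with ⟨h, _⟩; exact h
    rw [List.foldl_cons]
    have hb : (PySem.List.pySetD u (f p) (g p))[j]? = some v := by
      rw [PySem.List.pySetD_of_nonneg u (g p) (hpos p (List.mem_cons_self ..))]
      by_cases hpj : (f p).toNat = j
      · rw [hpj, List.getElem?_set_self hjlen, hsame p (List.mem_cons_self ..) hpj]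
      · rw [List.getElem?_set_ne hpj, hv]
    exact ih _ (fun q hq => hpos q (List.mem_cons_of_mem _ hq)) hb
      (fun q hq => hsame q (List.mem_cons_of_mem _ hq))

theorem mem_pvQ (w h : Int) (p : Int × Int) :
    p ∈ pvQ w h ↔ 1 ≤ p.1 ∧ p.1 < h - 1 ∧ 1 ≤ p.2 ∧ p.2 < w - 1 := by
  obtain ⟨r, c⟩ := p
  simp [pvQ, PySem.List.mem_pyRange_one]
  tauto

theorem rc_unique (w r c r' c' : Int) (hw : 0 < w) (hc : 0 ≤ c) (hc2 : c < w)
    (hc' : 0 ≤ c') (hc2' : c' < w) (he : r * w + c = r' * w + c') : r = r' ∧ c = c' := by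
  have hwne : w ≠ 0 := by omega
  have h1 : (c + r * w) / w = r := by
    rw [Int.add_mul_ediv_right _ _ hwne, Int.ediv_eq_zero_of_lt hc hc2, zero_add]
  have h2 : (c' + r' * w) / w = r' := by
    rw [Int.add_mul_ediv_right _ _ hwne, Int.ediv_eq_zero_of_lt hc' hc2', zero_add]
  have hcc : c + r * w = c' + r' * w := by omega
  have hr : r = r' := by rw [← h1, ← h2, hcc]
  refine ⟨hr, ?_⟩
  rw [hr] at he
  omega

theorem stepA_id (cur : List Int) (w h : Int) (hd : w < 3 ∨ h < 3) : pvStepA cur w h = cur := by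
  rcases hd with hd | hd
  · have : PySem.List.pyRange 1 (w - 1) 1 = [] := PySem.List.pyRange_one_eq_nil (by omega)
    simp [pvStepA, this]
  · have : PySem.List.pyRange 1 (h - 1) 1 = [] := PySem.List.pyRange_one_eq_nil (by omega)
    simp [pvStepA, this]

theorem stepA_length (cur : List Int) (w h : Int) : (pvStepA cur w h).length = cur.length := by
  rw [stepA_eq_fold]
  exact foldl_pySetD_length _ (fun p => p.1 * w + p.2) (pvG cur w) cur

theorem stepB_length (cur : List Int) (w h : Int) : (pvStepB cur w h).length = cur.length := by
  simp [pvStepB]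

theorem vert_getD (cur : List Int) (w h : Int) (k : Nat) (hk : k < cur.length) :
    PySem.List.pyGetD (pvVert cur w h) (k : Int) 0
      = if w ≤ (k : Int) ∧ (k : Int) < w * (h - 1) then
          PySem.List.pyGetD cur ((k : Int) - w) 0 + PySem.List.pyGetD cur (k : Int) 0
            + PySem.List.pyGetD cur ((k : Int) + w) 0
        else 0 := by
  rw [PySem.List.pyGetD_natCast, pvVert, PySem.List.getD_map_range _ _ _ _ hk]

theorem pyGetD_eq_getElem_nat (cur : List Int) (j : Nat) (hj : j < cur.length) :
    PySem.List.pyGetD cur (j : Int) 0 = cur[j] := by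
  rw [PySem.List.pyGetD_natCast, List.getD_eq_getElem cur 0 hj]

theorem smoothCell_not_interior (cur V : List Int) (w h : Int) (j : Nat)
    (hint : ¬(1 ≤ PySem.Int.floordiv (j : Int) w ∧ PySem.Int.floordiv (j : Int) w ≤ h - 2 ∧
      1 ≤ PySem.Int.mod (j : Int) w ∧ PySem.Int.mod (j : Int) w ≤ w - 2)) :
    pvSmoothCell cur V w h j = PySem.List.pyGetD cur (j : Int) 0 := by
  simp only [pvSmoothCell]
  rw [if_neg hint]

-- one interior cell: A's 3x3 scan value equals B's separable-convolution value
theorem interior_val (cur : List Int) (w h : Int) (j : Nat) (hw : 3 ≤ w) (_hh : 3 ≤ h)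
    (hlen : w * h ≤ (cur.length : Int)) (rj cj : Int)
    (hr1 : 1 ≤ rj) (hr2 : rj ≤ h - 2) (hc1 : 1 ≤ cj) (hc2 : cj ≤ w - 2)
    (hsum : rj * w + cj = (j : Int)) :
    pvG cur w (rj, cj) = pvSmoothCell cur (pvVert cur w h) w h j := by
  have hw0 : (0 : Int) < w := by omega
  have e1 : 1 * w ≤ rj * w := mul_le_mul_of_nonneg_right hr1 (by omega)
  have e2 : rj * w ≤ (h - 2) * w := mul_le_mul_of_nonneg_right hr2 (by omega)
  have hjlo : w + 1 ≤ (j : Int) := by linarith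
  have hjhi : (j : Int) + w + 1 ≤ w * h := by linarith
  have hfd : PySem.Int.floordiv (j : Int) w = rj :=
    (PySem.Int.floordiv_eq_iff_of_pos hw0).mpr ⟨by linarith, by linarith⟩
  have hmd : PySem.Int.mod (j : Int) w = cj := by
    have := PySem.Int.floordiv_mul_add_mod (j : Int) w
    rw [hfd] at this
    linarith
  have c1 : ((j - 1 : Nat) : Int) = (j : Int) - 1 := by omega
  have c2 : ((j + 1 : Nat) : Int) = (j : Int) + 1 := by push_cast; ring
  have v1 := vert_getD cur w h (j - 1) (by omega)
  have v2 := vert_getD cur w h j (by omega)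
  have v3 := vert_getD cur w h (j + 1) (by omega)
  rw [c1] at v1
  rw [c2] at v3
  rw [if_pos ⟨by linarith, by linarith⟩] at v1
  rw [if_pos ⟨by linarith, by linarith⟩] at v2
  rw [if_pos ⟨by linarith, by linarith⟩] at v3
  simp only [pvSmoothCell, hfd, hmd]
  rw [if_pos ⟨hr1, hr2, hc1, hc2⟩]
  simp only [pvG]
  rw [v1, v2, v3, ← hsum]
  have hnb : pvNeigh cur w rj cj =
      (PySem.List.pyGetD cur (rj * w + cj - 1 - w) 0 + PySem.List.pyGetD cur (rj * w + cj - 1) 0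
          + PySem.List.pyGetD cur (rj * w + cj - 1 + w) 0)
        + (PySem.List.pyGetD cur (rj * w + cj - w) 0 + PySem.List.pyGetD cur (rj * w + cj) 0
          + PySem.List.pyGetD cur (rj * w + cj + w) 0)
        + (PySem.List.pyGetD cur (rj * w + cj + 1 - w) 0 + PySem.List.pyGetD cur (rj * w + cj + 1) 0
          + PySem.List.pyGetD cur (rj * w + cj + 1 + w) 0)
        - PySem.List.pyGetD cur (rj * w + cj) 0 := by
    simp only [pvNeigh, List.foldl_cons, List.foldl_nil]
    norm_num
    ring_nf
  rw [hnb]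

-- the heart: one pass of A equals one pass of B
theorem stepAB_eq (cur : List Int) (w h : Int) (hw : 3 ≤ w) (hh : 3 ≤ h)
    (hlen : w * h ≤ (cur.length : Int)) : pvStepA cur w h = pvStepB cur w h := by
  have hw0 : (0 : Int) < w := by omega
  apply List.ext_getElem?
  intro j
  by_cases hj : j < cur.length
  swap
  · rw [List.getElem?_eq_none (by rw [stepA_length]; omega),
      List.getElem?_eq_none (by rw [stepB_length]; omega)]
  · have hB : (pvStepB cur w h)[j]? = some (pvSmoothCell cur (pvVert cur w h) w h j) := by
      simp only [pvStepB]
      rw [List.getElem?_map, List.getElem?_range hj]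
      rfl
    have hpos : ∀ p ∈ pvQ w h, 0 ≤ p.1 * w + p.2 := by
      intro p hp
      obtain ⟨h1, h2, h3, h4⟩ := (mem_pvQ w h p).mp hp
      have := mul_le_mul_of_nonneg_right h1 (by omega : (0 : Int) ≤ w)
      linarith
    have hmodnn : 0 ≤ PySem.Int.mod (j : Int) w := PySem.Int.mod_nonneg _ hw0
    have hmodlt : PySem.Int.mod (j : Int) w < w := PySem.Int.mod_lt _ hw0
    have hsum : PySem.Int.floordiv (j : Int) w * w + PySem.Int.mod (j : Int) w = (j : Int) :=
      PySem.Int.floordiv_mul_add_mod _ _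
    rw [stepA_eq_fold, hB]
    by_cases hint : 1 ≤ PySem.Int.floordiv (j : Int) w ∧ PySem.Int.floordiv (j : Int) w ≤ h - 2 ∧
        1 ≤ PySem.Int.mod (j : Int) w ∧ PySem.Int.mod (j : Int) w ≤ w - 2
    · obtain ⟨hr1, hr2, hc1, hc2⟩ := hint
      have hmem : (PySem.Int.floordiv (j : Int) w, PySem.Int.mod (j : Int) w) ∈ pvQ w h :=
        (mem_pvQ w h _).mpr ⟨hr1, by omega, hc1, by omega⟩
      obtain ⟨s, t, hq⟩ := List.append_of_mem hmem
      rw [hq, List.foldl_append, List.foldl_cons]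
      have hslen : (s.foldl (fun u p => PySem.List.pySetD u (p.1 * w + p.2) (pvG cur w p)) cur).length
          = cur.length := foldl_pySetD_length s _ _ cur
      have hfjnn : 0 ≤ PySem.Int.floordiv (j : Int) w * w + PySem.Int.mod (j : Int) w := by
        rw [hsum]; exact Int.natCast_nonneg j
      have hfj : (PySem.Int.floordiv (j : Int) w * w + PySem.Int.mod (j : Int) w).toNat = j := by
        rw [hsum]; exact Int.toNat_natCast j
      rw [foldl_pySetD_stable t (fun p => p.1 * w + p.2) (pvG cur w) _ j
          (pvG cur w (PySem.Int.floordiv (j : Int) w, PySem.Int.mod (j : Int) w))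
          (fun p hp => hpos p (by rw [hq]; exact List.mem_append_right _ (List.mem_cons_of_mem _ hp)))
          (by
            rw [PySem.List.pySetD_of_nonneg _ _ hfjnn, hfj]
            exact List.getElem?_set_self (by rw [hslen]; exact hj))
          (by
            intro p hp hpj
            have hpQ : p ∈ pvQ w h := by
              rw [hq]; exact List.mem_append_right _ (List.mem_cons_of_mem _ hp)
            obtain ⟨h1, h2, h3, h4⟩ := (mem_pvQ w h p).mp hpQ
            have hpj' : (p.1 * w + p.2).toNat = j := hpj
            have h0 : 0 ≤ p.1 * w + p.2 := hpos p hpQ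
            have hfpj : p.1 * w + p.2 = (j : Int) := by omega
            rw [← hsum] at hfpj
            obtain ⟨hpr, hpc⟩ := rc_unique w p.1 p.2 _ _ hw0 (by omega) (by omega) hmodnn hmodlt hfpj
            rw [show p = (p.1, p.2) from rfl, hpr, hpc])]
      congr 1
      exact interior_val cur w h j hw hh hlen _ _ hr1 hr2 hc1 hc2 hsum
    · rw [foldl_pySetD_stable (pvQ w h) (fun p => p.1 * w + p.2) (pvG cur w) cur j cur[j] hpos
        (List.getElem?_eq_getElem hj)
        (by
          intro p hp hpj
          obtain ⟨h1, h2, h3, h4⟩ := (mem_pvQ w h p).mp hp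
          have hpj' : (p.1 * w + p.2).toNat = j := hpj
          have h0 : 0 ≤ p.1 * w + p.2 := hpos p hp
          have hfpj : p.1 * w + p.2 = (j : Int) := by omega
          exfalso
          apply hint
          have hfd : PySem.Int.floordiv (j : Int) w = p.1 :=
            (PySem.Int.floordiv_eq_iff_of_pos hw0).mpr
              ⟨by linarith, by have : (p.1 + 1) * w = p.1 * w + w := by ring
                               linarith⟩
          have hmd : PySem.Int.mod (j : Int) w = p.2 := by
            have h5 := PySem.Int.floordiv_mul_add_mod (j : Int) w
            rw [hfd] at h5
            linarith
          rw [hfd, hmd]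
          exact ⟨h1, by omega, h3, by omega⟩)]
      rw [smoothCell_not_interior cur _ w h j hint, pyGetD_eq_getElem_nat cur j hj]

theorem smooth_land_spec : Claim_equal_smooth_land := by
  intro mask w h passes _ hpre
  unfold Spec_smooth_land smooth_land smooth_land_alt
  by_cases hd : w < 3 ∨ h < 3
  · simp only [if_pos hd]
    have : ∀ n : Nat, (List.range n).foldl (fun cur _ => pvStepA cur w h) mask = mask := by
      intro n
      induction n with
      | zero => rfl
      | succ n ih => rw [List.range_succ, List.foldl_append, ih, List.foldl_cons, List.foldl_nil,
          stepA_id _ _ _ hd]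
    exact this _
  · rw [not_or, not_lt, not_lt] at hd
    simp only [if_neg (by omega : ¬(w < 3 ∨ h < 3))]
    by_cases hp : passes ≤ 0
    · have : passes.toNat = 0 := by omega
      rw [this]; rfl
    · have hlen : w * h ≤ (mask.length : Int) := hpre ⟨by omega, hd.1, hd.2⟩
      have key : ∀ n : Nat,
          (List.range n).foldl (fun cur _ => pvStepA cur w h) mask
            = (List.range n).foldl (fun cur _ => pvStepB cur w h) mask
          ∧ ((List.range n).foldl (fun cur _ => pvStepB cur w h) mask).length = mask.length := by
        intro n
        induction n with
        | zero => exact ⟨rfl, rfl⟩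
        | succ n ih =>
          rw [List.range_succ, List.foldl_append, List.foldl_append, List.foldl_cons,
            List.foldl_cons, List.foldl_nil, List.foldl_nil]
          constructor
          · rw [ih.1, stepAB_eq _ _ _ hd.1 hd.2 (by rw [ih.2]; exact hlen)]
          · rw [stepB_length, ih.2]
      exact (key passes.toNat).1
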